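-- pv_equiv track=rewrite | github.com/WallerTsai/OJ-Solution | leetcode-py/动态规划/其他线性DP/多维DP/No3725.py | countCoprime
-- ===== SOURCE A (Python) =====
-- from collections import Counter
-- from functools import cache
-- from math import gcd
-- from typing import List
--
-- def countCoprime(mat: List[List[int]]) -> int:
--     MOD =  10 ** 9 + 7
--     n, m = len(mat), len(mat[0])
--     cnt = dict()
--     for i, li in enumerate(mat):
--         cnt[i] = Counter(li)
--
--
--     @cache
--     def dfs(i: int, t: int):
--         if t == 1:
--             res = pow(m, n - i) % MOD
--             return res
--
--         if i == n and t != 1: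
--             return 0
--
--         total = 0
--         d = cnt[i]
--         for k, v in d.items():
--             n_t = gcd(t, k)
--             total = (total + v * dfs(i + 1, n_t)) % MOD
--
--         return total
--
--     ans = 0
--     for a, b in cnt[0].items():
--         ans = (ans + b * dfs(1, a)) % MOD
--
--     return ans
-- ===== SOURCE B (Python) =====
-- from collections import Counter
-- from math import gcd
-- from typing import List
--
--
-- def countCoprime(mat: List[List[int]]) -> int:
--     # Bottom-up DP over the rows: dp maps a running gcd (never 1) to the number
--     # of ways reaching it; `done` counts picks whose gcd already hit 1 (each
--     # later row multiplies those by m = len(mat[0]) free choices).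
--     MOD = 10 ** 9 + 7
--     m = len(mat[0])
--     dp = Counter(mat[0])
--     done = dp.pop(1, 0) % MOD
--     for row in mat[1:]:
--         done = done * m % MOD
--         cnt = Counter(row)
--         ndp = {}
--         for g, w in dp.items():
--             for k, v in cnt.items():
--                 ng = gcd(g, k)
--                 if ng == 1:
--                     done = (done + w * v) % MOD
--                 else:
--                     ndp[ng] = (ndp.get(ng, 0) + w * v) % MOD
--         dp = ndp
--     return done % MOD
-- ===== Notes on version B (the rewrite author's own statement) =====
-- stated objective: alternative
-- what changed: Replaces the @cache top-down recursion over (row index, gcd) with an iterative bottom-up DP that folds the rows once, carrying a dict from running gcd to way-count plus a 'done' accumulator for picks whose gcd already reached 1.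
import Mathlib
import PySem

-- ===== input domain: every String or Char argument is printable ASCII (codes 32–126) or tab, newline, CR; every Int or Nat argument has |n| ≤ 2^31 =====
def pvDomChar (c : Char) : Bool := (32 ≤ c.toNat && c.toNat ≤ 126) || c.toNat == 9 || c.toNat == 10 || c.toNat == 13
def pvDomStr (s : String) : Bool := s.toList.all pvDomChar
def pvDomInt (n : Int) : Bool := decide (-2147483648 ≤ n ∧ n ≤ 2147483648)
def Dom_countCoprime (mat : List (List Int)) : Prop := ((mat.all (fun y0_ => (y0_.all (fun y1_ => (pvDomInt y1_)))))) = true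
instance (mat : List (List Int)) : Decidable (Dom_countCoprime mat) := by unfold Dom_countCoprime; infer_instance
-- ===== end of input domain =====

-- B replaces A's memoized top-down recursion by a bottom-up fold over the rows
-- carrying a gcd → way-count dict (objective: alternative decomposition).

-- ===== PORT A =====
-- cnt = dict(); for i, li in enumerate(mat): cnt[i] = Counter(li)
def cntA (mat : List (List Int)) : PySem.Dict Int (PySem.Dict Int Int) :=
  (PySem.List.enumerate mat).foldl (fun d p => d.insert p.1 (PySem.Dict.counter p.2)) PySem.Dict.empty

-- dfs(i, t) of A (the @cache only memoizes; values are unchanged).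
-- Python tests 'i == n'; dfs is only ever called with i ≤ n, where 'n ≤ i' is
-- the same test — written with ≤ for the termination measure n - i.
def dfsA (cnt : PySem.Dict Int (PySem.Dict Int Int)) (m : Int) (n : Nat) (i : Nat) (t : Int) : Int :=
  if t = 1 then (m ^ (n - i)) % 1000000007
  else if n ≤ i then 0
  else
    ((cnt.get? (i : Int)).getD PySem.Dict.empty).items.foldl
      (fun total kv => (total + kv.2 * dfsA cnt m n (i + 1) ((Int.gcd t kv.1 : Int))) % 1000000007) 0
termination_by n - i

def countCoprime (mat : List (List Int)) : Int :=
  let n := mat.length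
  let m : Int := ((PySem.List.pyGet? mat 0).getD []).length   -- mat[0]: IndexError on [] — excluded by Pre_
  let cnt := cntA mat
  ((cnt.get? 0).getD PySem.Dict.empty).items.foldl
    (fun ans ab => (ans + ab.2 * dfsA cnt m n 1 ab.1) % 1000000007) 0

-- ===== PORT B =====
-- one row of B's DP: done ← done*m % MOD, then fold dp.items × Counter(row).items
def stepB (m : Int) (st : Int × PySem.Dict Int Int) (row : List Int) : Int × PySem.Dict Int Int :=
  let cnt := PySem.Dict.counter row
  st.2.items.foldl
    (fun st gw =>
      cnt.items.foldl
        (fun st kv =>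
          let ng : Int := (Int.gcd gw.1 kv.1 : Int)
          if ng = 1 then ((st.1 + gw.2 * kv.2) % 1000000007, st.2)
          else (st.1, st.2.insert ng ((st.2.getD ng 0 + gw.2 * kv.2) % 1000000007)))
        st)
    (st.1 * m % 1000000007, PySem.Dict.empty)

def countCoprime_alt (mat : List (List Int)) : Int :=
  let m : Int := ((PySem.List.pyGet? mat 0).getD []).length
  let dp := PySem.Dict.counter ((PySem.List.pyGet? mat 0).getD [])
  -- done = dp.pop(1, 0) % MOD  (pop = lookup with default + erase)
  let done := dp.getD 1 0 % 1000000007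
  let dp := dp.erase 1
  (mat.tail.foldl (stepB m) (done, dp)).1 % 1000000007

-- ===== PRECONDITION & SPEC =====
-- A raises IndexError on mat = [] (mat[0]); excluded — B raises there too.
def Pre_countCoprime (mat : List (List Int)) : Prop := mat ≠ []
instance (mat : List (List Int)) : Decidable (Pre_countCoprime mat) := by unfold Pre_countCoprime; infer_instance
def pvWitness_countCoprime : List (List Int) := [[2, 3], [4, 9]]

def Spec_countCoprime (mat : List (List Int)) (out : Int) : Prop := out = countCoprime_alt mat
instance (mat : List (List Int)) (out : Int) : Decidable (Spec_countCoprime mat out) := by unfold Spec_countCoprime; infer_instance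

-- ===== CLAIM (what is proved, stated in full; the proofs are below) =====
def Claim_equal_countCoprime : Prop := ∀ (mat : List (List Int)), Dom_countCoprime mat → Pre_countCoprime mat → Spec_countCoprime mat (countCoprime mat)

-- ===== LEMMAS AND PROOFS =====

-- Everything modular lives in ZM := ZMod (10^9+7); both programs' outputs are
-- reduced mod 10^9+7 and nonnegative, so equality of their ZM images suffices.
abbrev ZM : Type := ZMod 1000000007

theorem castmod (a : Int) : ((a % (1000000007 : Int) : Int) : ZM) = (a : ZM) := by
  exact_mod_cast ZMod.intCast_mod a 1000000007

-- weighted sum of an items list: Σ (key, weight) ∈ l, weight * F key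
def wsum (F : Int → ZM) (l : List (Int × Int)) : ZM :=
  (l.map (fun p => ((p.2 : Int) : ZM) * F p.1)).sum

-- mod-free value function of A's dfs, over the list of row counters
def S (m : ZM) : List (PySem.Dict Int Int) → Int → ZM
  | [], t => if t = 1 then 1 else 0
  | c :: cs, t =>
      if t = 1 then m ^ (cs.length + 1)
      else wsum (fun k => S m cs ((Int.gcd t k : Int))) c.items

theorem S_one (m : ZM) (cs : List (PySem.Dict Int Int)) : S m cs 1 = m ^ cs.length := by
  cases cs <;> simp [S]

theorem cast_foldl_mod {α : Type} (l : List α) (f : α → Int) (a : Int) :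
    ((l.foldl (fun t x => (t + f x) % 1000000007) a : Int) : ZM)
      = (a : ZM) + (l.map (fun x => ((f x : Int) : ZM))).sum := by
  induction l generalizing a with
  | nil => simp
  | cons x l ih =>
      simp only [List.foldl_cons, List.map_cons, List.sum_cons, ih, castmod]
      push_cast
      ring

theorem enum_fst_nodup (mat : List (List Int)) : ((PySem.List.enumerate mat).map Prod.fst).Nodup := by
  have h := PySem.List.pairwise_lt_enumerate (xs := mat) (s := 0)
  have : ((PySem.List.enumerate mat).map Prod.fst).Pairwise (· < ·) := by
    rw [List.pairwise_map]; exact h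
  exact this.imp ne_of_lt

theorem cntA_items (mat : List (List Int)) :
    (cntA mat).items = (PySem.List.enumerate mat).map (fun p => (p.1, PySem.Dict.counter p.2)) := by
  unfold cntA
  rw [PySem.Dict.items_foldl_insert_fresh]
  · simp [PySem.Dict.empty]
  · intro a _; exact PySem.Dict.contains_empty _
  · exact enum_fst_nodup mat

theorem cntA_get? (mat : List (List Int)) (i : Nat) (h : i < mat.length) :
    (cntA mat).get? (i : Int) = some (PySem.Dict.counter mat[i]) := by
  have hk : (cntA mat).keys.Nodup := by
    have := enum_fst_nodup mat
    simp only [PySem.Dict.keys, cntA_items, List.map_map]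
    simpa [Function.comp] using this
  apply PySem.Dict.get?_of_mem_items _ ?_ hk
  rw [cntA_items]
  have : ((i : Int), mat[i]) ∈ PySem.List.enumerate mat := by
    rw [PySem.List.mem_enumerate_iff]
    exact ⟨i, h, by simp⟩
  exact List.mem_map.mpr ⟨_, this, rfl⟩

theorem dfsA_cast (mat : List (List Int)) (m : Int) :
    ∀ (k i : Nat) (t : Int), i + k = mat.length →
      ((dfsA (cntA mat) m mat.length i t : Int) : ZM)
        = S (m : ZM) ((mat.drop i).map PySem.Dict.counter) t := by
  intro k
  induction k with
  | zero =>
      intro i t hi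
      rw [dfsA]
      have hd : mat.drop i = [] := by rw [List.drop_eq_nil_iff]; omega
      by_cases ht : t = 1
      · simp [ht, hd, S, show mat.length - i = 0 by omega]
      · simp [ht, hd, S, show mat.length ≤ i by omega]
  | succ k ih =>
      intro i t hi
      have hlt : i < mat.length := by omega
      have hd : mat.drop i = mat[i] :: mat.drop (i + 1) := List.drop_eq_getElem_cons hlt
      rw [dfsA]
      by_cases ht : t = 1
      · have hlen : (mat.drop (i+1)).length = k := by simp; omega
        rw [show mat.length - i = k + 1 by omega, if_pos ht, castmod]
        simp only [hd, List.map_cons, S, List.length_map, hlen, ht, if_true]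
        push_cast
        ring
      · rw [if_neg ht, if_neg (by omega : ¬ mat.length ≤ i), cntA_get? mat i hlt]
        rw [cast_foldl_mod]
        simp only [hd, List.map_cons, S, if_neg ht, Option.getD_some]
        rw [show (0 : Int) = ((0:Int)) from rfl]
        have : ∀ kv : Int × Int, kv ∈ (PySem.Dict.counter mat[i]).items →
            ((kv.2 * dfsA (cntA mat) m mat.length (i + 1) ((Int.gcd t kv.1 : Int)) : Int) : ZM)
              = (kv.2 : ZM) * S (m : ZM) ((mat.drop (i+1)).map PySem.Dict.counter) ((Int.gcd t kv.1 : Int)) := by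
          intro kv _
          push_cast
          rw [ih (i+1) _ (by omega)]
        rw [List.map_congr_left this]
        simp [wsum]

theorem wsum_append (F : Int → ZM) (l1 l2 : List (Int × Int)) :
    wsum F (l1 ++ l2) = wsum F l1 + wsum F l2 := by
  simp [wsum]

-- when k is not among the keys, filtering it away / replacing at it is the identity

theorem filter_ne_of_not_mem (k : Int) (l : List (Int × Int)) (h : ∀ p ∈ l, p.1 ≠ k) :
    l.filter (fun p => !(p.1 == k)) = l := by
  apply List.filter_eq_self.mpr
  intro q hq
  simpa using h q hq

theorem map_replace_of_not_mem (k : Int) (nv : Int) (l : List (Int × Int)) (h : ∀ p ∈ l, p.1 ≠ k) :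
    l.map (fun p => if p.1 == k then (k, nv) else p) = l := by
  conv_rhs => rw [← List.map_id l]
  apply List.map_congr_left
  intro p hp
  simp [h p hp]

theorem key_split (d : PySem.Dict Int Int) (hn : d.keys.Nodup) (k : Int) (hc : d.contains k = true) :
    ∃ l1 w0 l2, d.items = l1 ++ (k, w0) :: l2 ∧ d.getD k 0 = w0 ∧
      (∀ p ∈ l1, p.1 ≠ k) ∧ (∀ p ∈ l2, p.1 ≠ k) := by
  obtain ⟨v, hv⟩ : ∃ v, d.get? k = some v := by
    have := PySem.Dict.contains_eq_isSome_get? (d := d) (k := k)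
    rw [hc] at this
    exact Option.isSome_iff_exists.mp this.symm
  have hmem := PySem.Dict.mem_items_of_get?_eq_some d hv
  obtain ⟨l1, l2, hsplit⟩ := List.append_of_mem hmem
  refine ⟨l1, v, l2, hsplit, PySem.Dict.getD_of_get?_eq_some d 0 hv, ?_, ?_⟩
  · intro p hp hpk
    have : ¬ (d.keys.Nodup) := by
      rw [PySem.Dict.keys, hsplit]
      simp only [List.map_append, List.map_cons, List.nodup_append]
      intro h
      exact (h.2.2 p.1 (List.mem_map_of_mem hp)) k (List.mem_cons_self) hpk
    exact this hn
  · intro p hp hpk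
    have : ¬ (d.keys.Nodup) := by
      rw [PySem.Dict.keys, hsplit]
      simp only [List.map_append, List.map_cons, List.nodup_append, List.nodup_cons]
      intro h
      exact h.2.1.1 (by rw [← hpk]; exact List.mem_map_of_mem hp)
    exact this hn

theorem wsum_erase (d : PySem.Dict Int Int) (hn : d.keys.Nodup) (k : Int) (F : Int → ZM) :
    wsum F d.items = wsum F ((d.erase k).items) + ((d.getD k 0 : Int) : ZM) * F k := by
  have herase : (d.erase k).items = d.items.filter (fun p => !(p.1 == k)) := by
    simp [PySem.Dict.erase]
  by_cases hc : d.contains k = true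
  · obtain ⟨l1, w0, l2, hsplit, hgd, h1, h2⟩ := key_split d hn k hc
    rw [herase, hsplit, hgd, List.filter_append, filter_ne_of_not_mem k l1 h1]
    rw [show ((k, w0) :: l2).filter (fun p => !(p.1 == k)) = l2.filter (fun p => !(p.1 == k)) by simp]
    rw [filter_ne_of_not_mem k l2 h2, wsum_append, wsum_append]
    simp only [wsum, List.map_cons, List.sum_cons]
    ring
  · have hc' : d.contains k = false := by simpa using hc
    rw [herase, filter_ne_of_not_mem k d.items, PySem.Dict.getD_of_not_contains d 0 hc']
    · simp
    · intro p hp hpk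
      have : d.contains k = true := by
        rw [PySem.Dict.contains_iff_mem_keys d k, PySem.Dict.keys]
        rw [← hpk]
        exact List.mem_map_of_mem hp
      rw [this] at hc'; exact absurd hc' (by simp)

theorem wsum_insert (d : PySem.Dict Int Int) (hn : d.keys.Nodup) (k x : Int) (F : Int → ZM) :
    wsum F ((d.insert k ((d.getD k 0 + x) % 1000000007)).items)
      = wsum F d.items + ((x : Int) : ZM) * F k := by
  by_cases hc : d.contains k = true
  · rw [PySem.Dict.items_insert_of_contains d _ hc]
    obtain ⟨l1, w0, l2, hsplit, hgd, h1, h2⟩ := key_split d hn k hc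
    rw [hsplit, hgd, List.map_append, List.map_cons]
    rw [map_replace_of_not_mem k _ l1 h1, map_replace_of_not_mem k _ l2 h2]
    simp only [beq_self_eq_true, if_true, wsum_append]
    simp only [wsum, List.map_cons, List.sum_cons, castmod]
    push_cast
    ring
  · have hc' : d.contains k = false := by simpa using hc
    rw [PySem.Dict.items_insert_of_not_contains d _ hc', PySem.Dict.getD_of_not_contains d 0 hc', wsum_append]
    simp only [wsum, List.map_cons, List.sum_cons, List.map_nil, List.sum_nil, castmod]
    push_cast
    ring

def innerF (g w : Int) : (Int × PySem.Dict Int Int) → (Int × Int) → (Int × PySem.Dict Int Int) :=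
  fun st kv =>
    if (Int.gcd g kv.1 : Int) = 1 then ((st.1 + w * kv.2) % 1000000007, st.2)
    else (st.1, st.2.insert ((Int.gcd g kv.1 : Int))
          ((st.2.getD ((Int.gcd g kv.1 : Int)) 0 + w * kv.2) % 1000000007))

theorem inner_cast (cs : List (PySem.Dict Int Int)) (mz : ZM) (g w : Int) (l : List (Int × Int)) :
    ∀ st : Int × PySem.Dict Int Int, st.2.keys.Nodup → (∀ p ∈ st.2.items, p.1 ≠ 1) →
      ((l.foldl (innerF g w) st).2.keys.Nodup)
      ∧ (∀ p ∈ (l.foldl (innerF g w) st).2.items, p.1 ≠ 1)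
      ∧ (((l.foldl (innerF g w) st).1 : ZM) * mz ^ cs.length
          + wsum (S mz cs) (l.foldl (innerF g w) st).2.items
          = (st.1 : ZM) * mz ^ cs.length + wsum (S mz cs) st.2.items
            + (w : ZM) * wsum (fun k => S mz cs ((Int.gcd g k : Int))) l) := by
  induction l with
  | nil =>
      intro st h1 h2
      refine ⟨h1, h2, by simp [wsum]⟩
  | cons kv l ih =>
      intro st h1 h2
      simp only [List.foldl_cons]
      by_cases hng : (Int.gcd g kv.1 : Int) = 1
      · have hf : innerF g w st kv = ((st.1 + w * kv.2) % 1000000007, st.2) := by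
          simp [innerF, hng]
        rw [hf]
        obtain ⟨c1, c2, c3⟩ := ih ((st.1 + w * kv.2) % 1000000007, st.2) h1 h2
        refine ⟨c1, c2, ?_⟩
        rw [c3]
        simp only [castmod, wsum, List.map_cons, List.sum_cons, hng, S_one]
        push_cast
        ring
      · have hf : innerF g w st kv = (st.1, st.2.insert ((Int.gcd g kv.1 : Int))
            ((st.2.getD ((Int.gcd g kv.1 : Int)) 0 + w * kv.2) % 1000000007)) := by
          simp [innerF, hng]
        rw [hf]
        have h1' : ((st.2.insert ((Int.gcd g kv.1 : Int)) ((st.2.getD ((Int.gcd g kv.1 : Int)) 0 + w * kv.2) % 1000000007)).keys).Nodup :=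
          PySem.Dict.nodup_keys_insert _ _ _ h1
        have h2' : ∀ p ∈ (st.2.insert ((Int.gcd g kv.1 : Int)) ((st.2.getD ((Int.gcd g kv.1 : Int)) 0 + w * kv.2) % 1000000007)).items, p.1 ≠ 1 := by
          intro p hp
          rcases (PySem.Dict.mem_items_insert _ _ _ _).mp hp with h | h
          · rw [h]; exact hng
          · exact h2 p h.1
        obtain ⟨c1, c2, c3⟩ := ih (st.1, st.2.insert ((Int.gcd g kv.1 : Int)) ((st.2.getD ((Int.gcd g kv.1 : Int)) 0 + w * kv.2) % 1000000007)) h1' h2'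
        refine ⟨c1, c2, ?_⟩
        rw [c3, wsum_insert st.2 h1]
        simp only [wsum, List.map_cons, List.sum_cons]
        push_cast
        ring

theorem stepB_eq (m : Int) (st : Int × PySem.Dict Int Int) (row : List Int) :
    stepB m st row = st.2.items.foldl
      (fun st gw => (PySem.Dict.counter row).items.foldl (innerF gw.1 gw.2) st)
      (st.1 * m % 1000000007, PySem.Dict.empty) := rfl

theorem outer_cast (cs : List (PySem.Dict Int Int)) (mz : ZM) (cnt : PySem.Dict Int Int) :
    ∀ (dpl : List (Int × Int)) (st : Int × PySem.Dict Int Int),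
      st.2.keys.Nodup → (∀ p ∈ st.2.items, p.1 ≠ 1) → (∀ p ∈ dpl, p.1 ≠ 1) →
      ((dpl.foldl (fun st gw => cnt.items.foldl (innerF gw.1 gw.2) st) st).2.keys.Nodup)
      ∧ (∀ p ∈ (dpl.foldl (fun st gw => cnt.items.foldl (innerF gw.1 gw.2) st) st).2.items, p.1 ≠ 1)
      ∧ (((dpl.foldl (fun st gw => cnt.items.foldl (innerF gw.1 gw.2) st) st).1 : ZM) * mz ^ cs.length
          + wsum (S mz cs) (dpl.foldl (fun st gw => cnt.items.foldl (innerF gw.1 gw.2) st) st).2.items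
          = (st.1 : ZM) * mz ^ cs.length + wsum (S mz cs) st.2.items
            + wsum (S mz (cnt :: cs)) dpl) := by
  intro dpl
  induction dpl with
  | nil =>
      intro st h1 h2 _
      refine ⟨h1, h2, by simp [wsum]⟩
  | cons gw dpl ih =>
      intro st h1 h2 h3
      simp only [List.foldl_cons]
      obtain ⟨c1, c2, c3⟩ := inner_cast cs mz gw.1 gw.2 cnt.items st h1 h2
      obtain ⟨d1, d2, d3⟩ := ih (cnt.items.foldl (innerF gw.1 gw.2) st) c1 c2
        (fun p hp => h3 p (List.mem_cons_of_mem gw hp))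
      refine ⟨d1, d2, ?_⟩
      rw [d3, c3]
      have hgw : S mz (cnt :: cs) gw.1 = wsum (fun k => S mz cs ((Int.gcd gw.1 k : Int))) cnt.items := by
        simp [S, h3 gw List.mem_cons_self]
      simp only [wsum, List.map_cons, List.sum_cons] at *
      rw [hgw]
      ring

theorem stepB_cast (m : Int) (row : List Int) (cs : List (PySem.Dict Int Int))
    (st : Int × PySem.Dict Int Int) (_h1 : st.2.keys.Nodup) (h2 : ∀ p ∈ st.2.items, p.1 ≠ 1) :
    ((stepB m st row).2.keys.Nodup)
    ∧ (∀ p ∈ (stepB m st row).2.items, p.1 ≠ 1)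
    ∧ (((stepB m st row).1 : ZM) * (m : ZM) ^ cs.length
        + wsum (S (m : ZM) cs) (stepB m st row).2.items
        = (st.1 : ZM) * (m : ZM) ^ (cs.length + 1)
          + wsum (S (m : ZM) (PySem.Dict.counter row :: cs)) st.2.items) := by
  rw [stepB_eq]
  have hne : (PySem.Dict.empty : PySem.Dict Int Int).keys.Nodup := by
    simp [PySem.Dict.empty, PySem.Dict.keys]
  have hni : ∀ p ∈ (PySem.Dict.empty : PySem.Dict Int Int).items, p.1 ≠ 1 := by
    simp [PySem.Dict.empty]
  obtain ⟨c1, c2, c3⟩ := outer_cast cs (m : ZM) (PySem.Dict.counter row) st.2.items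
    (st.1 * m % 1000000007, PySem.Dict.empty) hne hni h2
  refine ⟨c1, c2, ?_⟩
  rw [c3]
  have : ((PySem.Dict.empty : PySem.Dict Int Int)).items = [] := by simp [PySem.Dict.empty]
  rw [this]
  simp only [castmod, wsum, List.map_nil, List.sum_nil]
  push_cast
  ring

theorem foldB_cast (m : Int) (rows : List (List Int)) :
    ∀ st : Int × PySem.Dict Int Int, st.2.keys.Nodup → (∀ p ∈ st.2.items, p.1 ≠ 1) →
      (((rows.foldl (stepB m) st).1 : Int) : ZM)
        = (st.1 : ZM) * (m : ZM) ^ rows.length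
            + wsum (S (m : ZM) (rows.map PySem.Dict.counter)) st.2.items := by
  induction rows with
  | nil =>
      intro st h1 h2
      have : wsum (S (m : ZM) []) st.2.items = 0 := by
        apply List.sum_eq_zero
        intro x hx
        obtain ⟨p, hp, rfl⟩ := List.mem_map.mp hx
        simp [S, h2 p hp]
      simp [this]
  | cons row rows ih =>
      intro st h1 h2
      simp only [List.foldl_cons, List.map_cons, List.length_cons]
      obtain ⟨c1, c2, c3⟩ := stepB_cast m row (rows.map PySem.Dict.counter) st h1 h2
      rw [ih (stepB m st row) c1 c2]
      simp only [List.length_map] at c3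
      rw [c3]

theorem foldl_mod_range {α : Type} (l : List α) (f : α → Int) :
    ∀ a : Int, 0 ≤ a → a < 1000000007 →
      0 ≤ l.foldl (fun t x => (t + f x) % 1000000007) a
      ∧ l.foldl (fun t x => (t + f x) % 1000000007) a < 1000000007 := by
  induction l with
  | nil => intro a h1 h2; exact ⟨h1, h2⟩
  | cons x l ih =>
      intro a _ _
      exact ih _ (Int.emod_nonneg _ (by norm_num)) (Int.emod_lt_of_pos _ (by norm_num))

theorem countCoprime_cast (r0 : List Int) (rest : List (List Int)) :
    ((countCoprime (r0 :: rest) : Int) : ZM)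
      = wsum (S (((r0.length : Int) : ZM)) (rest.map PySem.Dict.counter)) (PySem.Dict.counter r0).items := by
  have hget : (cntA (r0 :: rest)).get? ((0 : Nat) : Int) = some (PySem.Dict.counter r0) :=
    cntA_get? (r0 :: rest) 0 (by simp)
  have hget0 : (cntA (r0 :: rest)).get? (0 : Int) = some (PySem.Dict.counter r0) := by
    exact_mod_cast hget
  simp only [countCoprime, PySem.List.pyGet?_zero_cons, Option.getD_some, hget0]
  rw [cast_foldl_mod]
  have hterm : ∀ ab ∈ (PySem.Dict.counter r0).items,
      ((ab.2 * dfsA (cntA (r0 :: rest)) ((r0.length : Int)) (r0 :: rest).length 1 ab.1 : Int) : ZM)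
        = ((ab.2 : Int) : ZM) * S (((r0.length : Int) : ZM)) (rest.map PySem.Dict.counter) ab.1 := by
    intro ab _
    push_cast
    rw [dfsA_cast (r0 :: rest) ((r0.length : Int)) rest.length 1 ab.1 (by simp; omega)]
    simp
  rw [List.map_congr_left hterm]
  simp [wsum]

theorem countCoprime_alt_cast (r0 : List Int) (rest : List (List Int)) :
    ((countCoprime_alt (r0 :: rest) : Int) : ZM)
      = wsum (S (((r0.length : Int) : ZM)) (rest.map PySem.Dict.counter)) (PySem.Dict.counter r0).items := by
  have hnd : (PySem.Dict.counter r0 : PySem.Dict Int Int).keys.Nodup := PySem.Dict.nodup_keys_counter r0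
  have herase : ((PySem.Dict.counter r0 : PySem.Dict Int Int).erase 1).items
      = (PySem.Dict.counter r0 : PySem.Dict Int Int).items.filter (fun p => !(p.1 == 1)) := by
    simp [PySem.Dict.erase]
  have hnd' : ((PySem.Dict.counter r0 : PySem.Dict Int Int).erase 1).keys.Nodup := by
    simp only [PySem.Dict.keys, herase]
    exact List.Nodup.sublist (List.Sublist.map _ List.filter_sublist) hnd
  have hne1 : ∀ p ∈ ((PySem.Dict.counter r0 : PySem.Dict Int Int).erase 1).items, p.1 ≠ 1 := by
    intro p hp
    rw [herase] at hp
    simpa using (List.of_mem_filter hp)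
  simp only [countCoprime_alt, PySem.List.pyGet?_zero_cons, Option.getD_some, List.tail_cons]
  rw [castmod, foldB_cast _ rest _ hnd' hne1, castmod]
  rw [wsum_erase (PySem.Dict.counter r0) hnd 1 (S (((r0.length : Int) : ZM)) (rest.map PySem.Dict.counter))]
  rw [S_one]
  simp only [List.length_map]
  ring

-- ===== VERDICT (by name: the statement is the Claim_ definition above) =====
theorem countCoprime_spec : Claim_equal_countCoprime := by
  intro mat _ hpre
  unfold Spec_countCoprime
  obtain ⟨r0, rest, rfl⟩ := List.exists_cons_of_ne_nil hpre
  have hA : ((countCoprime (r0 :: rest) : Int) : ZM) = ((countCoprime_alt (r0 :: rest) : Int) : ZM) := by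
    rw [countCoprime_cast, countCoprime_alt_cast]
  have hAr : 0 ≤ countCoprime (r0 :: rest) ∧ countCoprime (r0 :: rest) < 1000000007 := by
    simp only [countCoprime]
    exact foldl_mod_range _ _ 0 le_rfl (by norm_num)
  have hBr : 0 ≤ countCoprime_alt (r0 :: rest) ∧ countCoprime_alt (r0 :: rest) < 1000000007 := by
    simp only [countCoprime_alt]
    exact ⟨Int.emod_nonneg _ (by norm_num), Int.emod_lt_of_pos _ (by norm_num)⟩
  have hmod := (ZMod.intCast_eq_intCast_iff _ _ _).mp hA
  have : countCoprime (r0 :: rest) % 1000000007 = countCoprime_alt (r0 :: rest) % 1000000007 := by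
    exact_mod_cast hmod
  rw [Int.emod_eq_of_lt hAr.1 hAr.2, Int.emod_eq_of_lt hBr.1 hBr.2] at this
  exact this
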